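-- pv_equiv track=rewrite | github.com/howardh0214/Algorithms-Homework | HW9/count.py | count
-- ===== SOURCE A (Python) =====
-- import math
--
-- def count(l, k):
--     length = []
--     for i in range(1, l+1):
--         length.append(i)
--     for i in range(l-1, 0, -1):
--         length.append(i)
--
--     square = []
--     for i in range(len(length)):
--         #even
--         if length[i] % 2 == 0:
--             square.append(create_even(length[i]))
--         #odd
--         else:
--             square.append(create_odd(length[i]))
--
--     newlist = [item for items in square for item in items]
--
--     return newlist[k-1]
--
-- def create_odd(n):
--     output = []
--     if n == 1:
--         output = [1]
--     else:
--         for i in range(1, math.ceil(n/2)):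
--             output.append(i)
--         for i in range(math.ceil(n/2), 0, -1):
--             output.append(i)
--     return output
--
-- def create_even(n):
--     output = []
--     if n == 2:
--         output = [1, 1]
--     else:
--         for i in range(1, int(n/2)+1):
--             output.append(i)
--         for i in range(int(n/2), 0, -1):
--             output.append(i)
--     return output
-- ===== SOURCE B (Python) =====
-- import math
--
-- def count(l, k):
--     # O(1): locate the triangular-wave block by integer sqrt instead of
--     # materialising the whole l*l-element sequence.
--     total = l * l
--     idx = k - 1
--     if idx < 0:
--         idx += total          # Python negative-index wrap
--     first = l * (l + 1) // 2  # length of the blocks for widths 1..l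
--     if idx >= first:
--         idx = total - 1 - idx # whole sequence is a palindrome
--     m = (math.isqrt(8 * idx + 1) - 1) // 2   # block m has width m+1, starts at m*(m+1)//2
--     j = idx - m * (m + 1) // 2
--     n = m + 1
--     return min(j + 1, n - j)
-- ===== Notes on version B (the rewrite author's own statement) =====
-- stated objective: faster
-- what changed: B never builds the l*l-element wave list: it wraps the index, folds the second half onto the first by the sequence's palindrome symmetry, locates the block with an integer square root and returns the in-block value by a closed formula.
import Mathlib
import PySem

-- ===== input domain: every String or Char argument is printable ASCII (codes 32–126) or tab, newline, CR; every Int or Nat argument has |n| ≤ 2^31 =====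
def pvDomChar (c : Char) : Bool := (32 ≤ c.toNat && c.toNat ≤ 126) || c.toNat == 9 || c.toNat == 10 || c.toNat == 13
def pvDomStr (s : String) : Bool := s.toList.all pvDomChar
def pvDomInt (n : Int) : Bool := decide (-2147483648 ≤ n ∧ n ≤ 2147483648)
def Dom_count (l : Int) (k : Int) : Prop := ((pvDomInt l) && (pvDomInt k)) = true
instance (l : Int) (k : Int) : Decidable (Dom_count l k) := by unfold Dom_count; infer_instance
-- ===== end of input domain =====

-- B replaces A's construction of the whole l*l-element wave list by an O(1) closed form
-- (index wrap, palindrome fold, integer-sqrt block lookup).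

-- ===== PORT A =====
-- math.ceil(n/2): n/2 is an exact float for |n| ≤ 2^31 (the domain), so ceil(n/2) = (n+1)//2 — exact here
def create_odd (n : Int) : List Int :=
  if n == 1 then [1]
  else
    let c := PySem.Int.floordiv (n + 1) 2
    let output := (PySem.List.pyRange 1 c 1).foldl (fun acc i => acc ++ [i]) []
    (PySem.List.pyRange c 0 (-1)).foldl (fun acc i => acc ++ [i]) output

-- int(n/2): n/2 is an exact float on the domain; A calls this on EVEN n only, where truncation = floor
def create_even (n : Int) : List Int :=
  if n == 2 then [1, 1]
  else
    let h := PySem.Int.floordiv n 2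
    let output := (PySem.List.pyRange 1 (h + 1) 1).foldl (fun acc i => acc ++ [i]) []
    (PySem.List.pyRange h 0 (-1)).foldl (fun acc i => acc ++ [i]) output

def count (l : Int) (k : Int) : Int :=
  let len1 := (PySem.List.pyRange 1 (l + 1) 1).foldl (fun acc i => acc ++ [i]) []
  let length := (PySem.List.pyRange (l - 1) 0 (-1)).foldl (fun acc i => acc ++ [i]) len1
  let square := (PySem.List.pyRange 0 (length.length : Int) 1).foldl
      (fun acc i =>
        acc ++ [if PySem.Int.mod (PySem.List.pyGetD length i 0) 2 == 0
                then create_even (PySem.List.pyGetD length i 0)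
                else create_odd (PySem.List.pyGetD length i 0)]) []
  let newlist := square.flatMap (fun items => items)
  (PySem.List.pyGet? newlist (k - 1)).getD 0   -- none = IndexError, excluded by Pre_count

-- ===== PORT B =====
def count_alt (l : Int) (k : Int) : Int :=
  let total := l * l
  let idx0 := k - 1
  let idx1 := if idx0 < 0 then idx0 + total else idx0
  let first := PySem.Int.floordiv (l * (l + 1)) 2
  let idx2 := if idx1 ≥ first then total - 1 - idx1 else idx1
  let m : Int := PySem.Int.floordiv (((8 * idx2 + 1).toNat.sqrt : Int) - 1) 2  -- math.isqrt
  let j := idx2 - PySem.Int.floordiv (m * (m + 1)) 2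
  let n := m + 1
  min (j + 1) (n - j)

-- ===== PRECONDITION & SPEC =====
-- Pre_count excludes exactly the inputs where A raises IndexError: the generated list has
-- l*l elements (none for l ≤ 0), so Python needs -(l*l) ≤ k-1 < l*l.
def Pre_count (l : Int) (k : Int) : Prop := 1 ≤ l ∧ -(l * l) ≤ k - 1 ∧ k - 1 < l * l
instance (l : Int) (k : Int) : Decidable (Pre_count l k) := by unfold Pre_count; infer_instance
def pvWitness_count : Int × Int := (3, 5)

def Spec_count (l : Int) (k : Int) (out : Int) : Prop := out = count_alt l k
instance (l : Int) (k : Int) (out : Int) : Decidable (Spec_count l k out) := by unfold Spec_count; infer_instance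

-- ===== CLAIM (what is proved, stated in full; the proofs are below) =====
def Claim_equal_count : Prop := ∀ (l : Int) (k : Int), Dom_count l k → Pre_count l k → Spec_count l k (count l k)

-- ===== LEMMAS AND PROOFS =====

def wbN (n : Int) : List Int := (List.range n.toNat).map (fun (j : Nat) => min ((j : Int) + 1) (n - (j : Int)))
def triN (m : Nat) : Nat := m * (m + 1) / 2
def ascF (M : Nat) : List Int := ((List.range M).map (fun (i : Nat) => wbN ((i : Int) + 1))).flatten

theorem len_wbN (n : Int) : (wbN n).length = n.toNat := by simp [wbN]

theorem triN_two (m : Nat) : 2 * triN m = m * (m + 1) := by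
  obtain ⟨r, hr⟩ := Nat.even_mul_succ_self m
  unfold triN; omega

theorem triN_succ (m : Nat) : triN (m + 1) = triN m + (m + 1) := by
  have h1 := triN_two m
  have h2 := triN_two (m + 1)
  have h3 : (m + 1) * (m + 1 + 1) = m * (m + 1) + 2 * (m + 1) := by ring
  omega

theorem triN_le (m M : Nat) (h : m ≤ M) : triN m ≤ triN M := by
  induction M with
  | zero => have : m = 0 := by omega
            subst this; exact le_rfl
  | succ M ih =>
    rcases Nat.lt_or_ge m (M + 1) with h' | h'
    · have := triN_succ M; have := ih (by omega); omega
    · have : m = M + 1 := by omega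
      subst this; exact le_rfl

theorem ascF_succ (M : Nat) : ascF (M + 1) = ascF M ++ wbN ((M : Int) + 1) := by
  simp [ascF, List.range_succ]

theorem ascF_len (M : Nat) : (ascF M).length = triN M := by
  induction M with
  | zero => rfl
  | succ M ih =>
    rw [ascF_succ, List.length_append, ih, len_wbN, triN_succ]
    omega

theorem wbN_get (n : Int) (j : Nat) (hj : j < n.toNat) :
    (wbN n)[j]? = some (min ((j : Int) + 1) (n - (j : Int))) := by
  simp only [wbN, List.getElem?_map, List.getElem?_range, hj, Option.map_some]

theorem ascF_get (M m j : Nat) (hm : m < M) (hj : j < m + 1) :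
    (ascF M)[triN m + j]? = some (min ((j : Int) + 1) ((m : Int) + 1 - (j : Int))) := by
  induction M with
  | zero => omega
  | succ M ih =>
    rw [ascF_succ]
    rcases Nat.lt_or_ge m M with h' | h'
    · rw [List.getElem?_append_left, ih h']
      rw [ascF_len]
      have h1 := triN_succ m
      have h2 := triN_le (m + 1) M (by omega)
      omega
    · have hmM : m = M := by omega
      subst hmM
      rw [List.getElem?_append_right (by rw [ascF_len]; omega)]
      rw [ascF_len, Nat.add_sub_cancel_left]
      rw [wbN_get _ _ (by omega)]

theorem wbN_reverse (n : Int) : (wbN n).reverse = wbN n := by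
  apply List.ext_getElem?
  intro i
  rcases Nat.lt_or_ge i n.toNat with hi | hi
  · rw [List.getElem?_reverse (by rw [len_wbN]; exact hi)]
    rw [len_wbN, wbN_get _ _ (by omega), wbN_get _ _ hi]
    have h1 : ((n.toNat - 1 - i : Nat) : Int) = n - 1 - i := by omega
    rw [h1]
    have e1 : n - 1 - (i : Int) + 1 = n - i := by ring
    have e2 : n - (n - 1 - (i : Int)) = (i : Int) + 1 := by ring
    rw [e1, e2, min_comm]
  · rw [List.getElem?_eq_none (by rw [List.length_reverse, len_wbN]; omega),
        List.getElem?_eq_none (by rw [len_wbN]; omega)]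

theorem flatten_map_rev (g : Nat → List Int) (hg : ∀ i, (g i).reverse = g i) (M : Nat) :
    ((List.range M).map (fun i => g (M - 1 - i))).flatten =
      (((List.range M).map g).flatten).reverse := by
  induction M with
  | zero => rfl
  | succ M ih =>
    conv_lhs => rw [List.range_succ_eq_map]
    rw [List.range_succ (n := M), List.map_append, List.flatten_append, List.reverse_append]
    simp only [List.map_cons, List.map_map, List.flatten_cons, List.map_cons (f := g),
      List.flatten_cons, List.map_nil, List.flatten_nil, List.append_nil]
    have h1 : ((List.range M).map ((fun i => g (M + 1 - 1 - i)) ∘ Nat.succ)) =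
        (List.range M).map (fun i => g (M - 1 - i)) := by
      apply List.map_congr_left; intro i _
      simp only [Function.comp_apply]
      congr 1; omega
    rw [h1, ih, hg M]
    simp

def bvalN (idx : Nat) : Int :=
  let s := Nat.sqrt (8 * idx + 1)
  let m := (s - 1) / 2
  let j := idx - triN m
  min ((j : Int) + 1) ((m : Int) + 1 - (j : Int))

theorem sqrt_bracket (idx : Nat) :
    triN ((Nat.sqrt (8 * idx + 1) - 1) / 2) ≤ idx ∧
      idx < triN ((Nat.sqrt (8 * idx + 1) - 1) / 2 + 1) := by
  set s := Nat.sqrt (8 * idx + 1) with hs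
  have hs1 : 1 ≤ s := by
    rw [hs]
    have h := Nat.sqrt_le_sqrt (show 1 ≤ 8 * idx + 1 by omega)
    simpa using h
  set m := (s - 1) / 2 with hm
  have hlo : s * s ≤ 8 * idx + 1 := by
    have h := Nat.sqrt_le' (8 * idx + 1); rw [← hs] at h
    calc s * s = s ^ 2 := by ring
    _ ≤ 8 * idx + 1 := h
  have hhi : 8 * idx + 1 < (s + 1) * (s + 1) := by
    have h := Nat.lt_succ_sqrt' (8 * idx + 1); rw [← hs] at h
    calc 8 * idx + 1 < s.succ ^ 2 := h
    _ = (s + 1) * (s + 1) := by rw [Nat.succ_eq_add_one]; ring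
  have h2m : 2 * m + 1 ≤ s ∧ s ≤ 2 * m + 2 := by omega
  have e1 : (2 * m + 1) * (2 * m + 1) ≤ s * s := Nat.mul_le_mul h2m.1 h2m.1
  have e2 : (s + 1) * (s + 1) ≤ (2 * m + 3) * (2 * m + 3) :=
    Nat.mul_le_mul (by omega) (by omega)
  have t1 := triN_two m
  have t2 := triN_two (m + 1)
  have r1 : (2 * m + 1) * (2 * m + 1) = 4 * (m * (m + 1)) + 1 := by ring
  have r2 : (2 * m + 3) * (2 * m + 3) = 4 * ((m + 1) * (m + 1 + 1)) + 1 := by ring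
  omega

theorem ascF_get_bval (M idx : Nat) (h : idx < triN M) :
    (ascF M)[idx]? = some (bvalN idx) := by
  obtain ⟨h1, h2⟩ := sqrt_bracket idx
  set m := (Nat.sqrt (8 * idx + 1) - 1) / 2 with hm
  have hmM : m < M := by
    by_contra hc
    have := triN_le M m (by omega)
    omega
  have hj : idx - triN m < m + 1 := by have := triN_succ m; omega
  have hidx : idx = triN m + (idx - triN m) := by omega
  conv_lhs => rw [hidx]
  rw [ascF_get M m (idx - triN m) hmM hj]
  rfl

theorem triN_split (L : Nat) (hL : 1 ≤ L) : triN L + triN (L - 1) = L * L := by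
  obtain ⟨N, rfl⟩ := Nat.exists_eq_add_of_le hL
  have t1 := triN_two (1 + N)
  have t2 := triN_two (1 + N - 1)
  have h3 : 1 + N - 1 = N := by omega
  rw [h3] at t2
  rw [h3]
  have r : (1 + N) * (1 + N + 1) + N * (N + 1) = 2 * ((1 + N) * (1 + N)) := by ring
  omega

theorem wave_get (L I : Nat) (hL : 1 ≤ L) (hI : I < L * L) :
    (ascF L ++ (ascF (L - 1)).reverse)[I]? =
      some (if triN L ≤ I then bvalN (L * L - 1 - I) else bvalN I) := by
  have hsplit := triN_split L hL
  rcases Nat.lt_or_ge I (triN L) with h | h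
  · rw [List.getElem?_append_left (by rw [ascF_len]; exact h)]
    rw [ascF_get_bval L I h]
    simp [Nat.not_le.mpr h]
  · rw [List.getElem?_append_right (by rw [ascF_len]; exact h)]
    rw [ascF_len]
    have hlt : I - triN L < triN (L - 1) := by omega
    rw [List.getElem?_reverse (by rw [ascF_len]; exact hlt)]
    rw [ascF_len]
    have he : triN (L - 1) - 1 - (I - triN L) = L * L - 1 - I := by omega
    rw [he, ascF_get_bval (L - 1) _ (by omega)]
    simp [h]

-- generic: blocks of shape [1..c-1] ++ [c2..1] equal wbN n when c-1 + c2 = n and values fit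
theorem two_ramps_eq (n a b : Int) (ha : 0 ≤ a) (hb : 1 ≤ b) (hn : a + b = n)
    (hmin1 : ∀ i : Nat, i < a.toNat → (1 : Int) + i = min ((i : Int) + 1) (n - i))
    (hmin2 : ∀ i : Nat, a.toNat ≤ i → i < n.toNat → b - ((i : Int) - a) = min ((i : Int) + 1) (n - i)) :
    (PySem.List.pyRange 1 (a + 1) 1) ++ (PySem.List.pyRange b 0 (-1)) = wbN n := by
  rw [PySem.List.pyRange_one, PySem.List.pyRange_neg_one]
  apply List.ext_getElem?
  intro i
  have hl1 : (a + 1 - 1).toNat = a.toNat := by omega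
  have hl2 : (b - 0).toNat = b.toNat := by omega
  rcases Nat.lt_or_ge i n.toNat with hi | hi
  · rw [wbN_get n i hi]
    rcases Nat.lt_or_ge i a.toNat with hI | hI
    · rw [List.getElem?_append_left (by simp; omega)]
      simp only [List.getElem?_map, List.getElem?_range, hl1, hI, Option.map_some]
      congr 1
      have := hmin1 i hI
      simpa using this
    · rw [List.getElem?_append_right (by simp; omega)]
      simp only [List.length_map, List.length_range, hl1, hl2]
      have hilt : i - a.toNat < b.toNat := by omega
      simp only [List.getElem?_map, List.getElem?_range, hilt, Option.map_some]
      congr 1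
      have := hmin2 i hI hi
      have hc : ((i - a.toNat : Nat) : Int) = (i : Int) - a := by omega
      rw [hc]
      omega
  · rw [List.getElem?_eq_none, List.getElem?_eq_none]
    · rw [len_wbN]; omega
    · simp; omega

theorem create_odd_eq (n : Int) (h1 : 1 ≤ n) (h2 : PySem.Int.mod n 2 = 1) :
    create_odd n = wbN n := by
  have hmod := PySem.Int.floordiv_mul_add_mod n 2
  set q := PySem.Int.floordiv n 2 with hq
  have hn : n = 2 * q + 1 := by omega
  by_cases hone : n = 1
  · subst hone
    simp only [create_odd, beq_self_eq_true, if_true]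
    decide
  · have hq1 : 1 ≤ q := by omega
    have hc : PySem.Int.floordiv (n + 1) 2 = q + 1 := by
      rw [PySem.Int.floordiv_eq_iff_of_pos (by omega)]; omega
    simp only [create_odd, beq_iff_eq, hone, if_false, hc,
      PySem.List.foldl_append_singleton_eq_self, List.nil_append]
    have := two_ramps_eq n q (q + 1) (by omega) (by omega) (by omega)
      (by intro i hi; have : (i:Int) < q := by omega
          rw [min_eq_left (by omega)]; ring)
      (by intro i hi1 hi2
          have hge : q ≤ (i:Int) := by omega
          have hlt : (i:Int) < n := by omega
          rw [min_eq_right (by omega)]; omega)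
    simpa using this

theorem create_even_eq (n : Int) (h1 : 1 ≤ n) (h2 : PySem.Int.mod n 2 = 0) :
    create_even n = wbN n := by
  have hmod := PySem.Int.floordiv_mul_add_mod n 2
  set q := PySem.Int.floordiv n 2 with hq
  have hn : n = 2 * q := by omega
  by_cases htwo : n = 2
  · subst htwo
    simp only [create_even, beq_self_eq_true, if_true]
    decide
  · have hq1 : 2 ≤ q := by omega
    simp only [create_even, beq_iff_eq, htwo, if_false,
      PySem.List.foldl_append_singleton_eq_self, List.nil_append]
    rw [← hq]
    have := two_ramps_eq n q q (by omega) (by omega) (by omega)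
      (by intro i hi; have : (i:Int) < q := by omega
          rw [min_eq_left (by omega)]; ring)
      (by intro i hi1 hi2
          have hge : q ≤ (i:Int) := by omega
          have hlt : (i:Int) < n := by omega
          rw [min_eq_right (by omega)]; omega)
    simpa using this

theorem blockOf_eq (n : Int) (h1 : 1 ≤ n) :
    (if PySem.Int.mod n 2 == 0 then create_even n else create_odd n) = wbN n := by
  rcases PySem.Int.mod_two_eq n with h | h
  · rw [if_pos (by
      have e := PySem.Int.mod_eq_emod_of_pos (a := n) (b := 2) (by norm_num)
      simp
      omega), create_even_eq n h1 h]
  · rw [if_neg (by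
      have e := PySem.Int.mod_eq_emod_of_pos (a := n) (b := 2) (by norm_num)
      simp
      omega), create_odd_eq n h1 h]

theorem newlist_eq (l : Int) (hl : 1 ≤ l) :
    (((PySem.List.pyRange 1 (l + 1) 1 ++ PySem.List.pyRange (l - 1) 0 (-1)).map
        (fun n => if PySem.Int.mod n 2 == 0 then create_even n else create_odd n)).flatten) =
      ascF l.toNat ++ (ascF (l.toNat - 1)).reverse := by
  rw [List.map_append, List.flatten_append]
  congr 1
  · rw [PySem.List.pyRange_one]
    have h1 : (l + 1 - 1).toNat = l.toNat := by omega
    rw [h1, List.map_map]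
    unfold ascF
    congr 1
    apply List.map_congr_left
    intro i hi
    rw [List.mem_range] at hi
    simp only [Function.comp_apply]
    rw [blockOf_eq _ (by omega)]
    congr 1
    ring
  · rw [PySem.List.pyRange_neg_one]
    have h2 : (l - 1 - 0).toNat = l.toNat - 1 := by omega
    rw [h2, List.map_map]
    unfold ascF
    rw [← flatten_map_rev (fun i => wbN ((i : Int) + 1)) (fun i => wbN_reverse _) (l.toNat - 1)]
    congr 1
    apply List.map_congr_left
    intro i hi
    rw [List.mem_range] at hi
    simp only [Function.comp_apply]
    rw [blockOf_eq _ (by omega)]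
    congr 1
    omega

-- B computes bvalN of its reduced index
theorem count_alt_val (l k : Int) (h : Pre_count l k) :
    count_alt l k =
      (if triN l.toNat ≤ ((if k - 1 < 0 then k - 1 + l * l else k - 1)).toNat
       then bvalN (l.toNat * l.toNat - 1 - ((if k - 1 < 0 then k - 1 + l * l else k - 1)).toNat)
       else bvalN ((if k - 1 < 0 then k - 1 + l * l else k - 1)).toNat) := by
  obtain ⟨hl, hk1, hk2⟩ := h
  set L := l.toNat with hLdef
  have hlL : l = (L : Int) := by omega
  set I : Nat := ((if k - 1 < 0 then k - 1 + l * l else k - 1)).toNat with hIdef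
  have hI0 : (0 : Int) ≤ (if k - 1 < 0 then k - 1 + l * l else k - 1) := by
    split_ifs with hh
    · nlinarith
    · omega
  have hIlt : I < L * L := by
    have hcast : ((L : Int) * (L : Int)) = l * l := by rw [← hlL]
    have : (if k - 1 < 0 then k - 1 + l * l else k - 1) < l * l := by
      split_ifs with hh
      · omega
      · omega
    omega
  have hIint : (if k - 1 < 0 then k - 1 + l * l else k - 1) = (I : Int) := by omega
  unfold count_alt
  simp only []
  rw [hIint]
  have hfirst : PySem.Int.floordiv (l * (l + 1)) 2 = (triN L : Int) := by
    have e : l * (l + 1) = ((L * (L + 1) : Nat) : Int) := by push_cast [hlL]; ring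
    rw [e, PySem.Int.floordiv_eq_ediv_of_pos (by norm_num)]
    unfold triN
    omega
  rw [hfirst]
  have htot : l * l = ((L * L : Nat) : Int) := by push_cast [hlL]; ring
  by_cases hbr : (I : Int) ≥ (triN L : Int)
  · rw [if_pos hbr, if_pos (by exact_mod_cast hbr)]
    have hI2 : l * l - 1 - (I : Int) = ((L * L - 1 - I : Nat) : Int) := by
      rw [htot]; omega
    rw [hI2]
    set I2 : Nat := L * L - 1 - I with hI2def
    -- now show the sqrt/min tail equals bvalN I2
    have h8 : (8 * (I2 : Int) + 1).toNat = 8 * I2 + 1 := by omega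
    rw [h8]
    set s : Nat := Nat.sqrt (8 * I2 + 1) with hsdef
    have hs1 : 1 ≤ s := by
      have h := Nat.sqrt_le_sqrt (show 1 ≤ 8 * I2 + 1 by omega)
      simpa [← hsdef] using h
    have hm : PySem.Int.floordiv ((s : Int) - 1) 2 = (((s - 1) / 2 : Nat) : Int) := by
      have e : (s : Int) - 1 = ((s - 1 : Nat) : Int) := by omega
      rw [e, PySem.Int.floordiv_eq_ediv_of_pos (by norm_num)]
      omega
    rw [hm]
    set mN : Nat := (s - 1) / 2 with hmdef
    have htri : PySem.Int.floordiv ((mN : Int) * ((mN : Int) + 1)) 2 = (triN mN : Int) := by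
      have e : (mN : Int) * ((mN : Int) + 1) = ((mN * (mN + 1) : Nat) : Int) := by push_cast; ring
      rw [e, PySem.Int.floordiv_eq_ediv_of_pos (by norm_num)]
      unfold triN
      omega
    rw [htri]
    have hbrk := sqrt_bracket I2
    rw [← hsdef, ← hmdef] at hbrk
    have hj : (I2 : Int) - (triN mN : Int) = ((I2 - triN mN : Nat) : Int) := by omega
    rw [hj]
    unfold bvalN
    simp only [← hsdef, ← hmdef]
  · rw [if_neg hbr, if_neg (by exact_mod_cast hbr)]
    have h8 : (8 * (I : Int) + 1).toNat = 8 * I + 1 := by omega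
    rw [h8]
    set s : Nat := Nat.sqrt (8 * I + 1) with hsdef
    have hs1 : 1 ≤ s := by
      have h := Nat.sqrt_le_sqrt (show 1 ≤ 8 * I + 1 by omega)
      simpa [← hsdef] using h
    have hm : PySem.Int.floordiv ((s : Int) - 1) 2 = (((s - 1) / 2 : Nat) : Int) := by
      have e : (s : Int) - 1 = ((s - 1 : Nat) : Int) := by omega
      rw [e, PySem.Int.floordiv_eq_ediv_of_pos (by norm_num)]
      omega
    rw [hm]
    set mN : Nat := (s - 1) / 2 with hmdef
    have htri : PySem.Int.floordiv ((mN : Int) * ((mN : Int) + 1)) 2 = (triN mN : Int) := by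
      have e : (mN : Int) * ((mN : Int) + 1) = ((mN * (mN + 1) : Nat) : Int) := by push_cast; ring
      rw [e, PySem.Int.floordiv_eq_ediv_of_pos (by norm_num)]
      unfold triN
      omega
    rw [htri]
    have hbrk := sqrt_bracket I
    rw [← hsdef, ← hmdef] at hbrk
    have hj : (I : Int) - (triN mN : Int) = ((I - triN mN : Nat) : Int) := by omega
    rw [hj]
    unfold bvalN
    simp only [← hsdef, ← hmdef]

theorem count_eq_alt (l k : Int) (h : Pre_count l k) : count l k = count_alt l k := by
  obtain ⟨hl, hk1, hk2⟩ := h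
  unfold count
  simp only [PySem.List.foldl_append_singleton_eq_self, List.nil_append]
  rw [PySem.List.foldl_append_singleton_eq_map, List.nil_append]
  rw [show (fun (i : Int) =>
        (if PySem.Int.mod (PySem.List.pyGetD (PySem.List.pyRange 1 (l + 1) 1 ++ PySem.List.pyRange (l - 1) 0 (-1)) i 0) 2 == 0
         then create_even (PySem.List.pyGetD (PySem.List.pyRange 1 (l + 1) 1 ++ PySem.List.pyRange (l - 1) 0 (-1)) i 0)
         else create_odd (PySem.List.pyGetD (PySem.List.pyRange 1 (l + 1) 1 ++ PySem.List.pyRange (l - 1) 0 (-1)) i 0))) =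
      ((fun n => if PySem.Int.mod n 2 == 0 then create_even n else create_odd n) ∘
        (fun i => PySem.List.pyGetD (PySem.List.pyRange 1 (l + 1) 1 ++ PySem.List.pyRange (l - 1) 0 (-1)) i 0)) from rfl]
  rw [← List.map_map, PySem.List.map_pyGetD_pyRange_zero']
  rw [show (fun (items : List Int) => items) = (id : List Int → List Int) from rfl, List.flatMap_id]
  rw [newlist_eq l hl]
  set L := l.toNat with hLdef
  have hlL : l = (L : Int) := by omega
  set I : Nat := ((if k - 1 < 0 then k - 1 + l * l else k - 1)).toNat with hIdef
  have hIlt : I < L * L := by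
    have hcast2 : ((L * L : Nat) : Int) = l * l := by rw [hlL]; push_cast; ring
    have h' : (if k - 1 < 0 then k - 1 + l * l else k - 1) < l * l := by
      split_ifs with hh <;> omega
    omega
  have hlen : (ascF L ++ (ascF (L - 1)).reverse).length = L * L := by
    rw [List.length_append, List.length_reverse, ascF_len, ascF_len, triN_split L (by omega)]
  have hget : PySem.List.pyGet? (ascF L ++ (ascF (L - 1)).reverse) (k - 1) =
      (ascF L ++ (ascF (L - 1)).reverse)[I]? := by
    by_cases hneg : k - 1 < 0
    · have hkk : k - 1 = -(((-(k - 1)).toNat : Nat) : Int) := by omega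
      rw [hkk, PySem.List.pyGet?_neg_natCast]
      · congr 1
        rw [hlen]
        have : ((L : Int) * (L : Int)) = l * l := by rw [← hlL]
        simp only [hIdef, if_pos hneg]
        omega
      · omega
      · rw [hlen]
        have : ((L : Int) * (L : Int)) = l * l := by rw [← hlL]
        omega
    · rw [PySem.List.pyGet?_of_nonneg _ (by omega)]
      congr 1
      simp only [hIdef, if_neg hneg]
  rw [hget, wave_get L I (by omega) hIlt]
  rw [count_alt_val l k ⟨hl, hk1, hk2⟩]
  simp only [Option.getD_some]
  rw [← hLdef, ← hIdef]

-- ===== VERDICT (by name: the statement is the Claim_ definition above) =====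
theorem count_spec : Claim_equal_count := by
  intro l k _ hpre
  unfold Spec_count
  exact count_eq_alt l k hpre
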